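-- pv_equiv track=rewrite | github.com/shafiul-haque-johny/Hill-Climbing-Search-In-Python | Steepest_Ascent.py | state_generation
-- ===== SOURCE A (Python) =====
-- from copy import copy, deepcopy
--
-- def calc_cost(state):
--
--     state1 = deepcopy(state)
--     state_len = len(state1)
--     num = 0
--     i = 0
--
--     while i < state_len:
--         j = i + 1
--
--         while j < state_len:
--
--             if state1[j] < state1[i]:
--                 num = num + 1
--
--             j = j + 1
--
--         i = i + 1
--
--     return num
--
-- def state_generation(current_state, current_state_cost):
--
--     c_state = []
--     list_main = []
--     arr = []
--     len1 = len(current_state)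
--     i = 0
--
--     while i < len1:
--
--         c_state = deepcopy(current_state)
--         j = i + 1
--
--         while j < len1:
--
--             c_state[i], c_state[j] = c_state[j], c_state[i]
--             new_cost = calc_cost(c_state)
--             arr.append(new_cost)
--             list_main.append(c_state)
--             c_state = deepcopy(current_state)
--             j = j + 1
--
--         i = i + 1
--
--     main_cost = min(arr)
--     x = arr.index(main_cost)
--     main_state = list_main[x]
--
--     if main_cost < current_state_cost:
--         return main_state, main_cost
--
--     else:
--         return current_state, None
-- ===== SOURCE B (Python) =====
-- def state_generation(current_state, current_state_cost):
--     # One pass over all i<j swap candidates: inversion count of the input is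
--     # computed once, each candidate's cost is the base plus an O(j-i) delta
--     # over the elements between the swapped pair; the running best (strict <,
--     # so the first minimum wins, like min+index in the original) is kept and
--     # only the winning swapped list is ever materialised.
--     s = current_state
--     base = 0
--     rest = s
--     while rest:
--         x, rest = rest[0], rest[1:]
--         base += sum(1 for y in rest if y < x)
--     best_cost = None
--     best_state = None
--     pre = []
--     rest = s
--     while rest:
--         a, tail = rest[0], rest[1:]
--         mid = []
--         t2 = tail
--         while t2:
--             b, t2 = t2[0], t2[1:]
--             d = (a < b) - (b < a)
--             for c in mid:
--                 d += (c < b) - (c < a) + (a < c) - (b < c)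
--             nc = base + d
--             if best_cost is None or nc < best_cost:
--                 best_cost = nc
--                 best_state = pre + [b] + mid + [a] + t2
--             mid.append(b)
--         pre = pre + [a]
--         rest = tail
--     if best_cost is not None and best_cost < current_state_cost:
--         return best_state, best_cost
--     return current_state, None
-- ===== Notes on version B (the rewrite author's own statement) =====
-- stated objective: faster
-- what changed: Instead of rebuilding each swapped copy and recounting all inversions from scratch per candidate (A), B counts the input's inversions once and evaluates every i<j swap by an O(j-i) delta over the elements between the pair, keeping a running first-minimum so only the winning neighbour list is materialised.
import Mathlib
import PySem

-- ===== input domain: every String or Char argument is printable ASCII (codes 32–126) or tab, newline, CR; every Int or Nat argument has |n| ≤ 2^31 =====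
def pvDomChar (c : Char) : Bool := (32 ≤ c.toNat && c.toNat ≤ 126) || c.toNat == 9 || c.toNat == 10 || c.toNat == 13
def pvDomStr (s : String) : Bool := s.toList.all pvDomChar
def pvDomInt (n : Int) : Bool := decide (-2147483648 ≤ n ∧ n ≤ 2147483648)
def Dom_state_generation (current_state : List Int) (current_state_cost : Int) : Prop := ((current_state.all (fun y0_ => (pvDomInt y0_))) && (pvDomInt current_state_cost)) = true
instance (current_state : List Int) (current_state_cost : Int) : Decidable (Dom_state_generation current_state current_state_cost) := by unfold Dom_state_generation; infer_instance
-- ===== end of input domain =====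

-- B re-implements the pairwise-swap neighbour search with one base inversion
-- count plus an O(j-i) delta per swap and a running first-minimum, instead of
-- A's full recount per candidate; return value only, neither mutates its input.

-- ===== PORT A =====
-- inner while of calc_cost: j scans past i, counting inversions against s[i]
def ccInner (s : List Int) (i j : Nat) (num : Int) : Int :=
  if j < s.length then
    ccInner s i (j + 1) (if s.getD j 0 < s.getD i 0 then num + 1 else num)
  else num
termination_by s.length - j

-- outer while of calc_cost
def ccOuter (s : List Int) (i : Nat) (num : Int) : Int :=
  if i < s.length then ccOuter s (i + 1) (ccInner s i (i + 1) num) else num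
termination_by s.length - i

def calc_cost (s : List Int) : Int := ccOuter s 0 0

-- inner while of state_generation: swap positions i,j of a fresh copy, record cost and state
def sgInner (s : List Int) (i j : Nat) (arr : List Int) (lm : List (List Int)) :
    List Int × List (List Int) :=
  if j < s.length then
    sgInner s i (j + 1) (arr ++ [calc_cost ((s.set i (s.getD j 0)).set j (s.getD i 0))])
      (lm ++ [(s.set i (s.getD j 0)).set j (s.getD i 0)])
  else (arr, lm)
termination_by s.length - j

-- outer while of state_generation
def sgOuter (s : List Int) (i : Nat) (arr : List Int) (lm : List (List Int)) :
    List Int × List (List Int) :=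
  if i < s.length then
    sgOuter s (i + 1) (sgInner s i (i + 1) arr lm).1 (sgInner s i (i + 1) arr lm).2
  else (arr, lm)
termination_by s.length - i

def state_generation (current_state : List Int) (current_state_cost : Int) :
    List Int × Option Int :=
  let al := sgOuter current_state 0 [] []
  match PySem.List.min? al.1 (fun v => v) with
  | none => (current_state, none)  -- min([]) raises ValueError in Python: outside Pre_
  | some m =>
    let x := (PySem.List.index? al.1 m).getD 0
    let ms := al.2.getD x []
    if m < current_state_cost then (ms, some m) else (current_state, none)

-- ===== PORT B =====
-- base inversion count, structural pass (Source B's first while loop)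
def bBase (rest : List Int) (acc : Int) : Int :=
  match rest with
  | [] => acc
  | x :: r => bBase r (acc + (r.countP (fun y => y < x) : Int))

-- cost delta of swapping a (earlier) with b (later) across the elements mid between them
def bDelta (a b : Int) (mid : List Int) : Int :=
  mid.foldl
    (fun d c =>
      d + ((if c < b then (1 : Int) else 0) - (if c < a then 1 else 0) +
        (if a < c then 1 else 0) - (if b < c then 1 else 0)))
    ((if a < b then (1 : Int) else 0) - (if b < a then 1 else 0))

-- keep the running best; strict < keeps the FIRST minimum
def bStep (nc : Int) (st : List Int) (best : Option (Int × List Int)) :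
    Option (Int × List Int) :=
  match best with
  | none => some (nc, st)
  | some (bc, bs) => if nc < bc then some (nc, st) else some (bc, bs)

-- Source B's inner while over t2: b runs over the tail, mid collects the passed elements
def bInner (base a : Int) (pre mid t2 : List Int) (best : Option (Int × List Int)) :
    Option (Int × List Int) :=
  match t2 with
  | [] => best
  | b :: r =>
      bInner base a pre (mid ++ [b]) r
        (bStep (base + bDelta a b mid) (pre ++ b :: (mid ++ a :: r)) best)

-- Source B's outer while over rest
def bOuter (base : Int) (pre rest : List Int) (best : Option (Int × List Int)) :
    Option (Int × List Int) :=
  match rest with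
  | [] => best
  | a :: tail => bOuter base (pre ++ [a]) tail (bInner base a pre [] tail best)

def state_generation_alt (current_state : List Int) (current_state_cost : Int) :
    List Int × Option Int :=
  match bOuter (bBase current_state 0) [] current_state none with
  | none => (current_state, none)
  | some (bc, bs) =>
      if bc < current_state_cost then (bs, some bc) else (current_state, none)

-- ===== PRECONDITION & SPEC =====
-- A raises ValueError (min of the empty candidate list) iff there is no i<j pair,
-- i.e. iff the list has fewer than 2 elements; Pre_ excludes exactly those inputs.
def Pre_state_generation (current_state : List Int) (current_state_cost : Int) : Prop :=
  2 ≤ current_state.length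
instance (current_state : List Int) (current_state_cost : Int) :
    Decidable (Pre_state_generation current_state current_state_cost) := by
  unfold Pre_state_generation; infer_instance

def pvWitness_state_generation : List Int × Int := ([3, 1, 2], 5)

def Spec_state_generation (current_state : List Int) (current_state_cost : Int)
    (out : List Int × Option Int) : Prop :=
  out = state_generation_alt current_state current_state_cost
instance (current_state : List Int) (current_state_cost : Int) (out : List Int × Option Int) :
    Decidable (Spec_state_generation current_state current_state_cost out) := by
  unfold Spec_state_generation; infer_instance

-- ===== CLAIM (what is proved, stated in full; the proofs are below) =====
def Claim_equal_state_generation : Prop :=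
  ∀ (current_state : List Int) (current_state_cost : Int),
    Dom_state_generation current_state current_state_cost →
    Pre_state_generation current_state current_state_cost →
    Spec_state_generation current_state current_state_cost
      (state_generation current_state current_state_cost)

-- ===== LEMMAS AND PROOFS =====

-- specification-side inversion count
def inv : List Int → Int
  | [] => 0
  | x :: r => (r.countP (fun y => y < x) : Int) + inv r

-- crossing inversions between a prefix and a suffix
def cross : List Int → List Int → Int
  | [], _ => 0
  | x :: l, u => (u.countP (fun y => y < x) : Int) + cross l u

-- the candidate (cost, state) list, in A's and B's common enumeration order
def candsI (a : Int) (pre mid t2 : List Int) : List (Int × List Int) :=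
  match t2 with
  | [] => []
  | b :: r =>
      (inv (pre ++ b :: (mid ++ a :: r)), pre ++ b :: (mid ++ a :: r)) ::
        candsI a pre (mid ++ [b]) r

def candsO (pre rest : List Int) : List (Int × List Int) :=
  match rest with
  | [] => []
  | a :: tail => candsI a pre [] tail ++ candsO (pre ++ [a]) tail

lemma bBase_eq (r : List Int) (acc : Int) : bBase r acc = acc + inv r := by
  induction r generalizing acc with
  | nil => simp [bBase, inv]
  | cons x r ih => simp [bBase, inv, ih]; ring

lemma inv_append (l u : List Int) : inv (l ++ u) = inv l + cross l u + inv u := by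
  induction l with
  | nil => simp [inv, cross]
  | cons x l ih => simp [inv, cross, List.countP_append, ih]; push_cast; ring

lemma cross_cons_right (l : List Int) (y : Int) (u : List Int) :
    cross l (y :: u) = (l.countP (fun x => y < x) : Int) + cross l u := by
  induction l with
  | nil => simp [cross]
  | cons x l ih => simp [cross, List.countP_cons, ih]; push_cast; ring

lemma cross_append_right (l u v : List Int) :
    cross l (u ++ v) = cross l u + cross l v := by
  induction l with
  | nil => simp [cross]
  | cons x l ih => simp [cross, List.countP_append, ih]; push_cast; ring

lemma bDelta_eq (a b : Int) (mid : List Int) :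
    bDelta a b mid =
      ((if a < b then (1 : Int) else 0) - (if b < a then 1 else 0)) +
        ((mid.countP (fun c => c < b) : Int) - (mid.countP (fun c => c < a) : Int) +
          (mid.countP (fun c => a < c) : Int) - (mid.countP (fun c => b < c) : Int)) := by
  unfold bDelta
  rw [PySem.List.foldl_add]
  induction mid with
  | nil => simp
  | cons c mid ih =>
    simp only [List.map_cons, List.sum_cons, List.countP_cons, ih]
    push_cast
    by_cases h1 : c < b <;> by_cases h2 : c < a <;> by_cases h3 : a < c <;>
      by_cases h4 : b < c <;> simp [h1, h2, h3, h4] <;> push_cast <;> linarith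

-- the swap delta: exchanging a and b across mid changes inv by bDelta
lemma inv_swap (pre mid suf : List Int) (a b : Int) :
    inv (pre ++ b :: (mid ++ a :: suf)) =
      inv (pre ++ a :: (mid ++ b :: suf)) + bDelta a b mid := by
  have hx : ∀ x y : Int,
      inv (x :: (mid ++ y :: suf)) =
        (mid.countP (fun c => c < x) : Int) + (if y < x then 1 else 0) +
          (suf.countP (fun c => c < x) : Int) + inv mid +
          (mid.countP (fun c => y < c) : Int) + cross mid suf +
          (suf.countP (fun c => c < y) : Int) + inv suf := by
    intro x y
    show (((mid ++ y :: suf).countP (fun c => c < x) : Int) + inv (mid ++ y :: suf)) = _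
    rw [inv_append, cross_cons_right]
    simp [List.countP_append, List.countP_cons, inv]
    push_cast
    by_cases h : y < x <;> simp [h] <;> ring
  rw [inv_append, inv_append, cross_cons_right, cross_cons_right,
    cross_append_right, cross_append_right, cross_cons_right, cross_cons_right,
    hx b a, hx a b, bDelta_eq]
  push_cast
  ring

-- B's loops fold bStep over the candidate list
lemma bInner_eq (a : Int) (pre mid t2 : List Int) (best : Option (Int × List Int)) :
    bInner (inv (pre ++ a :: (mid ++ t2))) a pre mid t2 best =
      (candsI a pre mid t2).foldl (fun best c => bStep c.1 c.2 best) best := by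
  induction t2 generalizing mid best with
  | nil => simp [bInner, candsI]
  | cons b r ih =>
    simp only [bInner, candsI, List.foldl_cons]
    rw [(inv_swap pre mid r a b).symm]
    have h2 : mid ++ b :: r = (mid ++ [b]) ++ r := by simp
    rw [h2]
    exact ih (mid ++ [b]) _

lemma bOuter_eq (pre rest : List Int) (best : Option (Int × List Int)) :
    bOuter (inv (pre ++ rest)) pre rest best =
      (candsO pre rest).foldl (fun best c => bStep c.1 c.2 best) best := by
  induction rest generalizing pre best with
  | nil => simp [bOuter, candsO]
  | cons a tail ih =>
    simp only [bOuter, candsO, List.foldl_append]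
    have h0 : inv (pre ++ a :: tail) = inv (pre ++ a :: ([] ++ tail)) := by simp
    rw [h0, bInner_eq]
    have h1 : pre ++ a :: ([] ++ tail) = (pre ++ [a]) ++ tail := by simp
    rw [h1]
    exact ih (pre ++ [a]) _

-- A's calc_cost is inv
lemma ccInner_eq (s : List Int) (i j : Nat) (num : Int) :
    ccInner s i j num = num + ((s.drop j).countP (fun y => y < s.getD i 0) : Int) := by
  fun_induction ccInner s i j num with
  | case1 j num h ih =>
    have hg : s.getD j 0 = s[j] := List.getD_eq_getElem s 0 h
    rw [List.drop_eq_getElem_cons h, List.countP_cons]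
    split_ifs at ih ⊢ with hc hc2 <;> rw [ih] <;> rw [hg] at hc <;>
      simp only [decide_eq_true_eq] at * <;> push_cast <;> omega
  | case2 j num h =>
    rw [List.drop_eq_nil_of_le (by omega)]
    simp

lemma ccOuter_eq (s : List Int) (i : Nat) (num : Int) :
    ccOuter s i num = num + inv (s.drop i) := by
  fun_induction ccOuter s i num with
  | case1 i num h ih =>
    have hg : s.getD i 0 = s[i] := List.getD_eq_getElem s 0 h
    rw [ih, ccInner_eq, List.drop_eq_getElem_cons h, hg]
    simp only [inv]
    push_cast
    ring
  | case2 i num h =>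
    rw [List.drop_eq_nil_of_le (by omega)]
    simp [inv]

lemma calc_cost_eq (s : List Int) : calc_cost s = inv s := by
  have := ccOuter_eq s 0 0
  simpa [calc_cost] using this

-- index/set facts for the decomposition s = pre ++ x :: r
lemma getD_append_length (pre : List Int) (x : Int) (r : List Int) (d : Int) :
    (pre ++ x :: r).getD pre.length d = x := by
  induction pre with
  | nil => simp
  | cons p pre ih => simpa using ih

lemma set_append_length (pre : List Int) (x y : Int) (r : List Int) :
    (pre ++ x :: r).set pre.length y = pre ++ y :: r := by
  induction pre with
  | nil => simp
  | cons p pre ih => simpa using ih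

-- A's loops produce exactly the candidate list
lemma sgInner_eq (a : Int) (pre mid t2 : List Int) (arr : List Int) (lm : List (List Int)) :
    sgInner (pre ++ a :: (mid ++ t2)) pre.length (pre.length + 1 + mid.length) arr lm =
      (arr ++ (candsI a pre mid t2).map Prod.fst,
       lm ++ (candsI a pre mid t2).map Prod.snd) := by
  induction t2 generalizing mid arr lm with
  | nil =>
    rw [sgInner, if_neg (by simp [List.length_append]; omega)]
    simp [candsI]
  | cons b r ih =>
    have hlen : pre.length + 1 + mid.length < (pre ++ a :: (mid ++ b :: r)).length := by
      simp [List.length_append]; omega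
    rw [sgInner, if_pos hlen]
    have hgj : (pre ++ a :: (mid ++ b :: r)).getD (pre.length + 1 + mid.length) 0 = b := by
      have h1 : pre ++ a :: (mid ++ b :: r) = (pre ++ a :: mid) ++ b :: r := by simp
      have h2 : pre.length + 1 + mid.length = (pre ++ a :: mid).length := by simp; omega
      rw [h1, h2, getD_append_length]
    have hgi : (pre ++ a :: (mid ++ b :: r)).getD pre.length 0 = a :=
      getD_append_length pre a _ 0
    have hset :
        ((pre ++ a :: (mid ++ b :: r)).set pre.length b).set (pre.length + 1 + mid.length) a =
          pre ++ b :: (mid ++ a :: r) := by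
      rw [set_append_length]
      have h1 : pre ++ b :: (mid ++ b :: r) = (pre ++ b :: mid) ++ b :: r := by simp
      have h2 : pre.length + 1 + mid.length = (pre ++ b :: mid).length := by simp; omega
      rw [h1, h2, set_append_length]
      simp
    rw [hgj, hgi, hset, calc_cost_eq]
    have h3 : pre ++ a :: (mid ++ b :: r) = pre ++ a :: ((mid ++ [b]) ++ r) := by simp
    have h4 : pre.length + 1 + mid.length + 1 = pre.length + 1 + (mid ++ [b]).length := by
      simp
      omega
    rw [h3, h4, ih]
    simp [candsI]

lemma sgOuter_eq (pre rest : List Int) (arr : List Int) (lm : List (List Int)) :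
    sgOuter (pre ++ rest) pre.length arr lm =
      (arr ++ (candsO pre rest).map Prod.fst,
       lm ++ (candsO pre rest).map Prod.snd) := by
  induction rest generalizing pre arr lm with
  | nil =>
    rw [sgOuter, if_neg (by simp)]
    simp [candsO]
  | cons a tail ih =>
    have hlen : pre.length < (pre ++ a :: tail).length := by simp
    rw [sgOuter, if_pos hlen]
    have hin := sgInner_eq a pre [] tail arr lm
    simp only [List.nil_append, List.length_nil, Nat.add_zero] at hin
    rw [hin]
    have h2 : pre ++ a :: tail = (pre ++ [a]) ++ tail := by simp
    have h3 : pre.length + 1 = (pre ++ [a]).length := by simp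
    rw [h2, h3, ih]
    simp [candsO]

-- folding min from a smaller seed
lemma foldl_min_init (t : List Int) : ∀ a b : Int, t.foldl min (min a b) = min a (t.foldl min b) := by
  induction t with
  | nil => intro a b; simp
  | cons z t ih => intro a b; simp only [List.foldl_cons]; rw [min_assoc, ih]

lemma min?_cons (x : Int) (l : List Int) (m : Int)
    (h : PySem.List.min? l (fun v => v) = some m) :
    PySem.List.min? (x :: l) (fun v => v) = some (min x m) := by
  cases l with
  | nil =>
    rw [show PySem.List.min? ([] : List Int) (fun v => v) = none from by
      simp [PySem.List.min?_eq_none_iff]] at h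
    cases h
  | cons y t =>
    rw [PySem.List.min?_id_cons] at h ⊢
    have hm : t.foldl min y = m := by injection h
    simp only [List.foldl_cons, ← hm, foldl_min_init]

-- the running best equals min + first index
lemma foldBest_some (cs : List (Int × List Int)) (bc : Int) (bs : List Int) :
    cs.foldl (fun best c => bStep c.1 c.2 best) (some (bc, bs)) =
      match PySem.List.min? (cs.map Prod.fst) (fun v => v) with
      | none => some (bc, bs)
      | some m =>
          if m < bc then
            some (m, (cs.map Prod.snd).getD ((PySem.List.index? (cs.map Prod.fst) m).getD 0) [])
          else some (bc, bs) := by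
  induction cs generalizing bc bs with
  | nil =>
    simp only [List.foldl_nil, List.map_nil]
    rw [show PySem.List.min? ([] : List Int) (fun v => v) = none from by
      simp [PySem.List.min?_eq_none_iff]]
  | cons c rest ih =>
    simp only [List.foldl_cons, List.map_cons]
    have hb : bStep c.1 c.2 (some (bc, bs)) = some (if c.1 < bc then (c.1, c.2) else (bc, bs)) := by
      by_cases h : c.1 < bc <;> simp [bStep, h]
    rw [hb]
    cases hre : PySem.List.min? (rest.map Prod.fst) (fun v => v) with
    | none =>
      have hnil : rest = [] := by
        rw [PySem.List.min?_eq_none_iff] at hre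
        simpa using hre
      subst hnil
      simp only [List.map_nil]
      rw [show PySem.List.min? (c.1 :: ([] : List Int)) (fun v => v) = some c.1 from by
        rw [PySem.List.min?_id_cons]; rfl]
      simp only [List.foldl_nil]
      rw [PySem.List.index?_cons_self]
      by_cases h : c.1 < bc <;> simp [h]
    | some m =>
      have hmem : m ∈ rest.map Prod.fst := PySem.List.min?_mem hre
      have hsome : (PySem.List.index? (rest.map Prod.fst) m).isSome := by
        rw [PySem.List.index?_isSome_iff]; exact hmem
      obtain ⟨k, hk⟩ := Option.isSome_iff_exists.mp hsome
      have hfull : PySem.List.min? (c.1 :: rest.map Prod.fst) (fun v => v) = some (min c.1 m) :=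
        min?_cons c.1 (rest.map Prod.fst) m hre
      rw [ih]
      simp only [hfull, hre]
      by_cases hcb : c.1 < bc
      · simp only [if_pos hcb, if_pos (lt_of_le_of_lt (min_le_left c.1 m) hcb)]
        by_cases hmc : m < c.1
        · have hmin : min c.1 m = m := min_eq_right (le_of_lt hmc)
          have hne : c.1 ≠ m := by omega
          rw [if_pos hmc, hmin, PySem.List.index?_cons_of_ne _ hne, hk]
          simp
        · have hmin : min c.1 m = c.1 := min_eq_left (by omega)
          rw [if_neg hmc, hmin, PySem.List.index?_cons_self]
          simp
      · simp only [if_neg hcb]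
        by_cases hmb : m < bc
        · have hmc : m < c.1 := by omega
          have hmin : min c.1 m = m := min_eq_right (le_of_lt hmc)
          have hne : c.1 ≠ m := by omega
          rw [if_pos hmb, hmin, if_pos hmb, PySem.List.index?_cons_of_ne _ hne, hk]
          simp
        · have : ¬ min c.1 m < bc := by
            simp only [lt_min_iff] at *
            omega
          rw [if_neg hmb, if_neg this]

lemma foldBest_none (cs : List (Int × List Int)) (h : cs ≠ []) :
    ∃ m, PySem.List.min? (cs.map Prod.fst) (fun v => v) = some m ∧
      cs.foldl (fun best c => bStep c.1 c.2 best) none =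
        some (m, (cs.map Prod.snd).getD ((PySem.List.index? (cs.map Prod.fst) m).getD 0) []) := by
  obtain ⟨c, rest, rfl⟩ : ∃ c rest, cs = c :: rest := by
    cases cs with
    | nil => exact absurd rfl h
    | cons c rest => exact ⟨c, rest, rfl⟩
  simp only [List.foldl_cons, List.map_cons]
  have hb : bStep c.1 c.2 (none : Option (Int × List Int)) = some (c.1, c.2) := rfl
  rw [hb, foldBest_some]
  cases hre : PySem.List.min? (rest.map Prod.fst) (fun v => v) with
  | none =>
    have hnil : rest = [] := by
      rw [PySem.List.min?_eq_none_iff] at hre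
      simpa using hre
    subst hnil
    refine ⟨c.1, ?_, ?_⟩
    · simp only [List.map_nil]
      rw [PySem.List.min?_id_cons]; rfl
    · simp only [List.map_nil, List.foldl_nil]
      rw [PySem.List.index?_cons_self]; simp
  | some m =>
    have hmem : m ∈ rest.map Prod.fst := PySem.List.min?_mem hre
    have hsome : (PySem.List.index? (rest.map Prod.fst) m).isSome := by
      rw [PySem.List.index?_isSome_iff]; exact hmem
    obtain ⟨k, hk⟩ := Option.isSome_iff_exists.mp hsome
    have hfull : PySem.List.min? (c.1 :: rest.map Prod.fst) (fun v => v) = some (min c.1 m) :=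
      min?_cons c.1 (rest.map Prod.fst) m hre
    refine ⟨min c.1 m, hfull, ?_⟩
    simp only [hre]
    by_cases hmc : m < c.1
    · have hmin : min c.1 m = m := min_eq_right (le_of_lt hmc)
      have hne : c.1 ≠ m := by omega
      rw [if_pos hmc, hmin, PySem.List.index?_cons_of_ne _ hne, hk]
      simp
    · have hmin : min c.1 m = c.1 := min_eq_left (by omega)
      rw [if_neg hmc, hmin, PySem.List.index?_cons_self]
      simp

lemma candsO_ne_nil (a b : Int) (r : List Int) (pre : List Int) :
    candsO pre (a :: b :: r) ≠ [] := by
  simp [candsO, candsI]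

-- ===== VERDICT (by name: the statement is the Claim_ definition above) =====
theorem state_generation_spec : Claim_equal_state_generation := by
  unfold Claim_equal_state_generation
  intro s cost hdom hpre
  unfold Spec_state_generation
  obtain ⟨a, b, r, rfl⟩ : ∃ a b r, s = a :: b :: r := by
    cases s with
    | nil => simp [Pre_state_generation] at hpre
    | cons a t =>
      cases t with
      | nil => simp [Pre_state_generation] at hpre
      | cons b r => exact ⟨a, b, r, rfl⟩
  have hA := sgOuter_eq [] (a :: b :: r) [] []
  simp only [List.nil_append, List.length_nil] at hA
  have hBbase : bBase (a :: b :: r) 0 = inv (a :: b :: r) := by rw [bBase_eq]; ring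
  have hB := bOuter_eq [] (a :: b :: r) none
  simp only [List.nil_append] at hB
  obtain ⟨m, hmin, hfold⟩ :=
    foldBest_none (candsO [] (a :: b :: r)) (candsO_ne_nil a b r [])
  simp only [state_generation, state_generation_alt, hA, hBbase, hB, hfold, hmin]
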